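-- pv_equiv track=rewrite | github.com/zengxyu/pedestrian_preview | visualize_utilities/metric_extractor.py | iterate_conditions
-- ===== SOURCE A (Python) =====
-- import itertools
-- from typing import Dict, List
--
-- def iterate_conditions(conditions: Dict):
--     values_keys_lists = []
--     for key, values in conditions.items():
--         value_key_list = []
--         for value in values:
--             value_key_list.append({value: key})
--         values_keys_lists.append(value_key_list)
--     # unfold conditions
--     res = list(itertools.product(*values_keys_lists))
--
--     # invert {value:key} to {key:value}
--     new_values_keys_lists = []
--     for value_key_list in res:
--         new_value_key_list = {}
--         for item in value_key_list:
--             for value, key in item.items():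
--                 new_value_key_list[key] = value
--         new_values_keys_lists.append(new_value_key_list)
--     return new_values_keys_lists
-- ===== SOURCE B (Python) =====
-- def iterate_conditions(conditions):
--     result = [{}]
--     for key, values in conditions.items():
--         result = [{**partial, key: value} for partial in result for value in values]
--     return result
-- ===== Notes on version B (the rewrite author's own statement) =====
-- stated objective: simpler
-- what changed: B builds the Cartesian product incrementally with an accumulator of partial dicts ({**partial, key: value} per key), eliminating A's per-value {value:key} wrapping, itertools.product, and the whole inversion pass.
import Mathlib
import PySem

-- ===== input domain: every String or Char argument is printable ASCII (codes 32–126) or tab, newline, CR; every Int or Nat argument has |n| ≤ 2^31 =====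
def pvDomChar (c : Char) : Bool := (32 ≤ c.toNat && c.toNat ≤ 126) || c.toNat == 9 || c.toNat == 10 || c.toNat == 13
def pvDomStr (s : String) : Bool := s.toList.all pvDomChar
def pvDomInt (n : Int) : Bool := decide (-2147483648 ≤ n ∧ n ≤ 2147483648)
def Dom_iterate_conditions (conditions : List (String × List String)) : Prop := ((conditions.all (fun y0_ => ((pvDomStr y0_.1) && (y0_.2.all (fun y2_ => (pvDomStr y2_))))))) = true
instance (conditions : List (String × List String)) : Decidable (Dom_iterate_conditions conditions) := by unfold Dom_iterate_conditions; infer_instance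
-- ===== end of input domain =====

-- B builds the Cartesian product incrementally over the keys (accumulator of partial dicts),
-- dropping A's {value:key} wrapping, itertools.product, and the inversion pass. Objective: simpler.

-- ===== PORT A =====
-- list(itertools.product(*lists)) : first factor varies slowest, last fastest.
def pvProductA {α : Type} : List (List α) → List (List α)
  | [] => [[]]
  | xs :: rest => xs.flatMap (fun x => (pvProductA rest).map (fun t => x :: t))

def iterate_conditions (conditions : List (String × List String)) : List (List (String × String)) :=
  -- values_keys_lists: for each (key, values), the list of singleton dicts {value: key}
  let values_keys_lists : List (List (PySem.Dict String String)) :=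
    conditions.map (fun kv => kv.2.map (fun v => PySem.Dict.ofList [(v, kv.1)]))
  let res := pvProductA values_keys_lists
  -- invert {value:key} to {key:value}
  (res.map (fun value_key_list =>
    (value_key_list.foldl (fun d item =>
      item.items.foldl (fun d vk => d.insert vk.2 vk.1) d) PySem.Dict.empty))).map
    (fun d => d.items)

-- ===== PORT B =====
def iterate_conditions_alt (conditions : List (String × List String)) : List (List (String × String)) :=
  (conditions.foldl
    (fun result kv =>
      result.flatMap (fun partial_ => kv.2.map (fun v => partial_.insert kv.1 v)))
    ([PySem.Dict.empty] : List (PySem.Dict String String))).map (fun d => d.items)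

-- ===== PRECONDITION & SPEC =====
def Spec_iterate_conditions (conditions : List (String × List String)) (out : List (List (String × String))) : Prop := out = iterate_conditions_alt conditions
instance (conditions : List (String × List String)) (out : List (List (String × String))) : Decidable (Spec_iterate_conditions conditions out) := by unfold Spec_iterate_conditions; infer_instance

-- ===== CLAIM (what is proved, stated in full; the proofs are below) =====
def Claim_equal_iterate_conditions : Prop := ∀ (conditions : List (String × List String)), Dom_iterate_conditions conditions → Spec_iterate_conditions conditions (iterate_conditions conditions)

-- ===== LEMMAS AND PROOFS =====

-- A's invert-fold over one tuple of singleton dicts, started at d.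
def pvInvert (d : PySem.Dict String String)
    (t : List (PySem.Dict String String)) : PySem.Dict String String :=
  t.foldl (fun d item => item.items.foldl (fun d vk => d.insert vk.2 vk.1) d) d

theorem pvInvert_cons (d : PySem.Dict String String) (v k : String)
    (t : List (PySem.Dict String String)) :
    pvInvert d (PySem.Dict.ofList [(v, k)] :: t) = pvInvert (d.insert k v) t := rfl

-- Main invariant: B's accumulator loop equals distributing A's product+invert over the start dicts.
theorem pvLoop_eq (conditions : List (String × List String))
    (ds : List (PySem.Dict String String)) :
    conditions.foldl
      (fun result kv =>
        result.flatMap (fun partial_ => kv.2.map (fun v => partial_.insert kv.1 v))) ds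
    = ds.flatMap (fun d =>
        (pvProductA (conditions.map (fun kv => kv.2.map (fun v => PySem.Dict.ofList [(v, kv.1)])))).map
          (pvInvert d)) := by
  induction conditions generalizing ds with
  | nil => simp [pvProductA, pvInvert]
  | cons kv rest ih =>
      simp only [List.foldl_cons, ih, pvProductA, List.map_cons]
      simp only [List.flatMap_assoc, List.flatMap_map, List.map_flatMap, List.map_map]
      refine List.flatMap_congr (fun d _ => ?_)
      refine List.flatMap_congr (fun v _ => ?_)
      simp [Function.comp, pvInvert_cons]

-- ===== VERDICT (by name: the statement is the Claim_ definition above) =====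
theorem iterate_conditions_spec : Claim_equal_iterate_conditions := by
  intro conditions _
  unfold Spec_iterate_conditions iterate_conditions iterate_conditions_alt
  rw [pvLoop_eq]
  simp [pvInvert, List.map_map]
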